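-- pv_equiv track=rewrite | github.com/je488/Algorithm-Study | 백준/BOJ_14890.py | go
-- ===== SOURCE A (Python) =====
-- def go(a, l):
--     n = len(a)
--     c = [False] * n
--     for i in range(1, n):
--         if a[i-1] != a[i]:
--             diff = abs(a[i] - a[i-1])
--             if diff != 1:
--                 return False
--             if a[i-1] < a[i]:
--                 for j in range(1, l+1):
--                     if i-j < 0:
--                         return False
--                     if a[i-1] != a[i-j]:
--                         return False
--                     if c[i-j]:
--                         return False
--                     c[i-j] = True
--             else:
--                 for j in range(l):
--                     if i+j >= n:
--                         return False
--                     if a[i] != a[i+j]: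
--                         return False
--                     if c[i+j]:
--                         return False
--                     c[i+j] = True
--     return True
-- ===== SOURCE B (Python) =====
-- def go(a, l):
--     n = len(a)
--     run = 1        # length of the equal-value run ending at the previous cell
--     covered = 0    # indices below this are already consumed by a ramp
--     for i in range(1, n):
--         d = a[i] - a[i-1]
--         if d == 0:
--             run += 1
--             continue
--         if i < covered:
--             return False
--         if d == 1:
--             if run < l or i - l < covered:
--                 return False
--             covered = i
--         elif d == -1:
--             covered = i + l
--         else:
--             return False
--         run = 1
--     return covered <= n
-- ===== Notes on version B (the rewrite author's own statement) =====
-- stated objective: alternative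
-- what changed: A simulates ramp placement with a mutable boolean marker array and, at each height change, re-scans up to l cells in an inner loop; B makes a single pass with O(1) state, tracking the length of the current equal-value run and the extent ('covered') of the last placed ramp, deciding each transition with two integer comparisons and checking downhill ramps lazily at the next height change.
import Mathlib
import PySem

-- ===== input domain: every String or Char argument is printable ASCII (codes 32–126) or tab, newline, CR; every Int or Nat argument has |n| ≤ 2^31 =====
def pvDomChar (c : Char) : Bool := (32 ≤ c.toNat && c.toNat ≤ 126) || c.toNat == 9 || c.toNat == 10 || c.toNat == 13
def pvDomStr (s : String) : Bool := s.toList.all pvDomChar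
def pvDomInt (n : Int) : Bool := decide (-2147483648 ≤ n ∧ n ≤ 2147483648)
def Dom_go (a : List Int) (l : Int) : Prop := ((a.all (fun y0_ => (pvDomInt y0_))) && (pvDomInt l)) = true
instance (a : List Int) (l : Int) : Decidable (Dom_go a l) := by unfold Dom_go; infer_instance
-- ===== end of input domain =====

-- B replaces A's mutable marker array and its nested ramp-checking loops by a single pass that
-- tracks the current equal-run length and the extent of the last placed ramp (O(1) extra space).

-- ===== PORT A =====
-- inner uphill loop: 'for j in range(1, l+1)' (l.toNat iterations, j starts at 1)
def goUp (a : List Int) (i : Nat) : Int → List Bool → Nat → Option (List Bool)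
  | _, c, 0 => some c
  | j, c, fuel+1 =>
    if (i : Int) - j < 0 then none
    else if a.getD (i-1) 0 ≠ a.getD ((i : Int) - j).toNat 0 then none
    else if c.getD ((i : Int) - j).toNat false then none
    else goUp a i (j+1) (c.set ((i : Int) - j).toNat true) fuel

-- inner downhill loop: 'for j in range(l)' (l.toNat iterations, j starts at 0)
def goDown (a : List Int) (i : Nat) : Nat → List Bool → Nat → Option (List Bool)
  | _, c, 0 => some c
  | j, c, fuel+1 =>
    if a.length ≤ i + j then none
    else if a.getD i 0 ≠ a.getD (i+j) 0 then none
    else if c.getD (i+j) false then none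
    else goDown a i (j+1) (c.set (i+j) true) fuel

-- outer loop: 'for i in range(1, n)'
def goLoop (a : List Int) (l : Int) : Nat → List Bool → Nat → Bool
  | _, _, 0 => true
  | i, c, fuel+1 =>
    if a.getD (i-1) 0 ≠ a.getD i 0 then
      if (a.getD i 0 - a.getD (i-1) 0).natAbs ≠ 1 then false
      else if a.getD (i-1) 0 < a.getD i 0 then
        match goUp a i 1 c l.toNat with
        | none => false
        | some c' => goLoop a l (i+1) c' fuel
      else
        match goDown a i 0 c l.toNat with
        | none => false
        | some c' => goLoop a l (i+1) c' fuel
    else goLoop a l (i+1) c fuel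

def go (a : List Int) (l : Int) : Bool :=
  goLoop a l 1 (List.replicate a.length false) (a.length - 1)

-- ===== PORT B =====
def goAltLoop (a : List Int) (l : Int) : Nat → Int → Int → Nat → Bool
  | _, _, covered, 0 => decide (covered ≤ (a.length : Int))
  | i, run, covered, fuel+1 =>
    let d := a.getD i 0 - a.getD (i-1) 0
    if d = 0 then goAltLoop a l (i+1) (run+1) covered fuel
    else if (i : Int) < covered then false
    else if d = 1 then
      if run < l ∨ (i : Int) - l < covered then false
      else goAltLoop a l (i+1) 1 (i : Int) fuel
    else if d = -1 then goAltLoop a l (i+1) 1 ((i : Int) + l) fuel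
    else false

def go_alt (a : List Int) (l : Int) : Bool :=
  goAltLoop a l 1 1 0 (a.length - 1)

-- ===== PRECONDITION & SPEC =====
def Spec_go (a : List Int) (l : Int) (out : Bool) : Prop := out = go_alt a l
instance (a : List Int) (l : Int) (out : Bool) : Decidable (Spec_go a l out) := by unfold Spec_go; infer_instance

-- ===== CLAIM (what is proved, stated in full; the proofs are below) =====
def Claim_equal_go : Prop := ∀ (a : List Int) (l : Int), Dom_go a l → Spec_go a l (go a l)

-- ===== LEMMAS AND PROOFS =====

theorem getD_set_bool (c : List Bool) (idx m : Nat) (b : Bool) :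
    (c.set idx b).getD m false =
      if m = idx ∧ idx < c.length then b else c.getD m false := by
  simp only [List.getD, List.getElem?_set]
  by_cases h1 : idx = m
  · subst h1
    by_cases h2 : idx < c.length <;> simp [h2]
  · have h2 : ¬ m = idx := fun h => h1 h.symm
    simp [h1, h2]

-- joint invariant between A's marker array c and B's (run, covered) state at loop entry i
def GoInv (a : List Int) (l : Int) (i : Nat) (run covered : Int) (c : List Bool) : Prop :=
  c.length = a.length ∧
  1 ≤ run ∧ run ≤ (i : Int) ∧
  (∀ m : Nat, (i : Int) ≤ (m : Int) + run → m < i → a.getD m 0 = a.getD (i-1) 0) ∧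
  (run = (i : Int) ∨ a.getD (i - run.toNat - 1) 0 ≠ a.getD (i - run.toNat) 0) ∧
  covered ≤ (a.length : Int) ∧
  (∀ m : Nat, i - 1 ≤ m → (m : Int) < covered → a.getD m 0 = a.getD (i-1) 0) ∧
  (∀ m : Nat, covered ≤ (m : Int) → c.getD m false = false) ∧
  (1 ≤ l → 1 ≤ covered → l ≤ covered ∧
    ∀ m : Nat, covered - l ≤ (m : Int) → (m : Int) < covered → c.getD m false = true) ∧
  (l ≤ 0 → ∀ m : Nat, c.getD m false = false)

theorem goUp_some (a : List Int) (i : Nat) (fuel : Nat) :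
    ∀ (j : Int) (c : List Bool), 1 ≤ j → (i : Int) ≤ (c.length : Int) →
    (∀ t : Nat, t < fuel → 0 ≤ (i : Int) - (j + t) ∧
        a.getD ((i : Int) - (j + t)).toNat 0 = a.getD (i-1) 0 ∧
        c.getD ((i : Int) - (j + t)).toNat false = false) →
    ∃ c', goUp a i j c fuel = some c' ∧ c'.length = c.length ∧
      ∀ m : Nat, c'.getD m false =
        (c.getD m false ||
          decide ((i : Int) - j - fuel < (m : Int) ∧ (m : Int) ≤ (i : Int) - j)) := by
  induction fuel with
  | zero =>
    intro j c _ _ _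
    refine ⟨c, rfl, rfl, fun m => ?_⟩
    have h : ¬ ((i : Int) - j - ((0:Nat):Int) < (m : Int) ∧ (m : Int) ≤ (i : Int) - j) := by
      push_cast
      omega
    rw [decide_eq_false h, Bool.or_false]
  | succ fuel ih =>
    intro j c hj hic h
    obtain ⟨h0a, h0b, h0c⟩ := h 0 (Nat.succ_pos fuel)
    push_cast at h0a h0b h0c
    have hnneg : ¬ ((i : Int) - j < 0) := by omega
    have h0b' : a.getD ((i : Int) - j).toNat 0 = a.getD (i-1) 0 := by
      simpa using h0b
    have h0c' : c.getD ((i : Int) - j).toNat false = false := by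
      simpa using h0c
    have h0a' : 0 ≤ (i : Int) - j := by omega
    have hb2 : ¬ (a.getD (i-1) 0 ≠ a.getD ((i : Int) - j).toNat 0) := not_ne_iff.mpr h0b'.symm
    have hc2 : ¬ (c.getD ((i : Int) - j).toNat false = true) := by
      rw [h0c']; exact Bool.false_ne_true
    rw [goUp, if_neg hnneg, if_neg hb2, if_neg hc2]
    have hidx : ((i : Int) - j).toNat < c.length := by omega
    have hyp : ∀ t : Nat, t < fuel → 0 ≤ (i : Int) - (j + 1 + t) ∧
        a.getD ((i : Int) - (j + 1 + t)).toNat 0 = a.getD (i-1) 0 ∧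
        (c.set ((i : Int) - j).toNat true).getD ((i : Int) - (j + 1 + t)).toNat false = false := by
      intro t ht
      obtain ⟨ha', hb', hc'⟩ := h (t+1) (by omega)
      have e : (i : Int) - (j + 1 + (t : Int)) = (i : Int) - (j + ((t+1 : Nat) : Int)) := by
        push_cast; ring
      refine ⟨by rw [e]; exact ha', by rw [e]; exact hb', ?_⟩
      rw [e, getD_set_bool, if_neg ?_]
      · exact hc'
      · rintro ⟨hcell, -⟩
        have ha2 : 0 ≤ (i : Int) - (j + ((t+1 : Nat) : Int)) := ha'
        push_cast at ha2
        omega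
    rcases ih (j+1) (c.set ((i : Int) - j).toNat true) (by omega) (by simp only [List.length_set]; exact hic) hyp with ⟨c', hup, hlen, hpt⟩
    refine ⟨c', hup, by simpa using hlen, fun m => ?_⟩
    rw [hpt m, getD_set_bool]
    by_cases hm : m = ((i : Int) - j).toNat
    · subst hm
      rw [if_pos ⟨rfl, hidx⟩]
      simp only [Bool.true_or]
      symm
      rw [h0c']
      simp only [Bool.false_or, decide_eq_true_eq]
      constructor <;> omega
    · rw [if_neg (fun hh => hm hh.1)]
      congr 1
      simp only [decide_eq_decide]
      have hmne : (m : Int) ≠ (i : Int) - j := by omega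
      constructor <;> (intro hh; push_cast at hh ⊢; omega)

theorem goUp_none (a : List Int) (i : Nat) (fuel : Nat) :
    ∀ (j : Int) (c : List Bool),
    (∃ t : Nat, t < fuel ∧ ((i : Int) - (j + t) < 0 ∨
        (0 ≤ (i : Int) - (j + t) ∧
          (a.getD ((i : Int) - (j + t)).toNat 0 ≠ a.getD (i-1) 0 ∨
           c.getD ((i : Int) - (j + t)).toNat false = true)))) →
    goUp a i j c fuel = none := by
  induction fuel with
  | zero => intro j c ⟨t, ht, _⟩; omega
  | succ fuel ih =>
    intro j c ⟨t, ht, hbad⟩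
    rw [goUp]
    by_cases h1 : (i : Int) - j < 0
    · rw [if_pos h1]
    · rw [if_neg h1]
      by_cases h2 : a.getD (i-1) 0 ≠ a.getD ((i : Int) - j).toNat 0
      · rw [if_pos h2]
      · rw [if_neg h2]
        push_neg at h2
        by_cases h3 : c.getD ((i : Int) - j).toNat false = true
        · rw [if_pos h3]
        · rw [if_neg h3]
          have htpos : 1 ≤ t := by
            rcases Nat.eq_zero_or_pos t with rfl | hp
            · exfalso
              rcases hbad with hb | ⟨hb0, hb⟩
              · push_cast at hb; omega
              · rcases hb with hb | hb
                · refine hb ?_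
                  have e0 : (i : Int) - (j + ((0:Nat):Int)) = (i : Int) - j := by push_cast; ring
                  rw [e0]
                  exact h2.symm
                · refine absurd ?_ h3
                  have e0 : (i : Int) - (j + ((0:Nat):Int)) = (i : Int) - j := by push_cast; ring
                  rw [e0] at hb
                  exact hb
            · exact hp
          apply ih (j+1)
          refine ⟨t - 1, by omega, ?_⟩
          have e : (i : Int) - (j + 1 + ((t-1 : Nat) : Int)) = (i : Int) - (j + (t : Int)) := by
            push_cast; omega
          rw [e]
          rcases hbad with hb | ⟨hb0, hb⟩
          · left; exact hb
          · right
            refine ⟨hb0, ?_⟩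
            rcases hb with hb | hb
            · left; exact hb
            · right
              rw [getD_set_bool, if_neg ?_]
              · exact hb
              · rintro ⟨hcell, -⟩
                omega

theorem goDown_some (a : List Int) (i : Nat) (fuel : Nat) :
    ∀ (j : Nat) (c : List Bool), c.length = a.length →
    (∀ t : Nat, t < fuel → i + j + t < a.length ∧
        a.getD (i + j + t) 0 = a.getD i 0 ∧ c.getD (i + j + t) false = false) →
    ∃ c', goDown a i j c fuel = some c' ∧ c'.length = c.length ∧
      ∀ m : Nat, c'.getD m false =
        (c.getD m false || decide (i + j ≤ m ∧ m < i + j + fuel)) := by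
  induction fuel with
  | zero =>
    intro j c _ _
    refine ⟨c, rfl, rfl, fun m => ?_⟩
    have h : ¬ (i + j ≤ m ∧ m < i + j + 0) := by omega
    rw [decide_eq_false h, Bool.or_false]
  | succ fuel ih =>
    intro j c hlen h
    obtain ⟨h0a, h0b, h0c⟩ := h 0 (Nat.succ_pos fuel)
    rw [Nat.add_zero] at h0a h0b h0c
    have hb2 : ¬ (a.getD i 0 ≠ a.getD (i+j) 0) := not_ne_iff.mpr h0b.symm
    have hc2 : ¬ (c.getD (i+j) false = true) := by rw [h0c]; exact Bool.false_ne_true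
    rw [goDown, if_neg (by omega), if_neg hb2, if_neg hc2]
    have hidx : i + j < c.length := by omega
    have hyp : ∀ t : Nat, t < fuel → i + (j+1) + t < a.length ∧
        a.getD (i + (j+1) + t) 0 = a.getD i 0 ∧
        (c.set (i+j) true).getD (i + (j+1) + t) false = false := by
      intro t ht
      obtain ⟨ha', hb', hc'⟩ := h (t+1) (by omega)
      have e : i + (j+1) + t = i + j + (t+1) := by omega
      refine ⟨by omega, by rw [e]; exact hb', ?_⟩
      rw [e, getD_set_bool, if_neg (by rintro ⟨hcell, -⟩; omega)]
      exact hc'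
    rcases ih (j+1) (c.set (i+j) true) (by simp only [List.length_set]; exact hlen) hyp with
      ⟨c', hdn, hlen', hpt⟩
    refine ⟨c', hdn, by simpa using hlen', fun m => ?_⟩
    rw [hpt m, getD_set_bool]
    by_cases hm : m = i + j
    · subst hm
      rw [if_pos ⟨rfl, hidx⟩]
      simp only [Bool.true_or]
      symm
      rw [h0c]
      simp only [Bool.false_or, decide_eq_true_eq]
      omega
    · rw [if_neg (fun hh => hm hh.1)]
      congr 1
      simp only [decide_eq_decide]
      omega

theorem goDown_none (a : List Int) (i : Nat) (fuel : Nat) :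
    ∀ (j : Nat) (c : List Bool),
    (∃ t : Nat, t < fuel ∧ (a.length ≤ i + j + t ∨
        (i + j + t < a.length ∧
          (a.getD (i + j + t) 0 ≠ a.getD i 0 ∨ c.getD (i + j + t) false = true)))) →
    goDown a i j c fuel = none := by
  induction fuel with
  | zero => intro j c ⟨t, ht, _⟩; omega
  | succ fuel ih =>
    intro j c ⟨t, ht, hbad⟩
    rw [goDown]
    by_cases h1 : a.length ≤ i + j
    · rw [if_pos h1]
    · rw [if_neg h1]
      by_cases h2 : a.getD i 0 ≠ a.getD (i+j) 0
      · rw [if_pos h2]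
      · rw [if_neg h2]
        push_neg at h2
        by_cases h3 : c.getD (i+j) false = true
        · rw [if_pos h3]
        · rw [if_neg h3]
          have htpos : 1 ≤ t := by
            rcases Nat.eq_zero_or_pos t with rfl | hp
            · exfalso
              rw [Nat.add_zero] at hbad
              rcases hbad with hb | ⟨-, hb | hb⟩
              · omega
              · exact hb h2.symm
              · exact h3 hb
            · exact hp
          apply ih (j+1)
          refine ⟨t - 1, by omega, ?_⟩
          have e : i + (j+1) + (t-1) = i + j + t := by omega
          rw [e]
          rcases hbad with hb | ⟨hb0, hb | hb⟩
          · left; exact hb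
          · right; exact ⟨hb0, Or.inl hb⟩
          · right
            refine ⟨hb0, Or.inr ?_⟩
            rw [getD_set_bool, if_neg (by rintro ⟨hcell, -⟩; omega)]
            exact hb

theorem alt_doomed (a : List Int) (l : Int) :
    ∀ (fuel i : Nat) (run covered : Int), i + fuel = a.length →
    ((a.length : Int) < covered ∨ ∃ m : Nat, i ≤ m ∧ m < a.length ∧ (m : Int) < covered ∧
        a.getD m 0 ≠ a.getD (m-1) 0) →
    goAltLoop a l i run covered fuel = false := by
  intro fuel
  induction fuel with
  | zero =>
    intro i run covered hn hdoom
    rw [goAltLoop]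
    rcases hdoom with h | ⟨m, hm1, hm2, _, _⟩
    · simp only [decide_eq_false_iff_not, not_le]
      omega
    · omega
  | succ fuel ih =>
    intro i run covered hn hdoom
    have hin : i < a.length := by omega
    have hicov : (i : Int) < covered := by
      rcases hdoom with h | ⟨m, hm1, hm2, hm3, _⟩
      · omega
      · omega
    simp only [goAltLoop]
    by_cases hd : a.getD i 0 - a.getD (i-1) 0 = 0
    · rw [if_pos hd]
      apply ih (i+1) (run+1) covered (by omega)
      rcases hdoom with h | ⟨m, hm1, hm2, hm3, hm4⟩
      · exact Or.inl h
      · rcases Nat.eq_or_lt_of_le hm1 with he | h'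
        · exfalso; subst he; omega
        · exact Or.inr ⟨m, by omega, hm2, hm3, hm4⟩
    · rw [if_neg hd, if_pos hicov]

theorem main_loop (a : List Int) (l : Int) :
    ∀ (fuel i : Nat) (run covered : Int) (c : List Bool),
    i + fuel = a.length → 1 ≤ i → GoInv a l i run covered c →
    goLoop a l i c fuel = goAltLoop a l i run covered fuel := by
  intro fuel
  induction fuel with
  | zero =>
    intro i run covered c hn hi inv
    obtain ⟨hlen, hrun1, hruni, heq, hmax, hcovn, hcov2, h3a, h3b, h3c⟩ := inv
    simp only [goLoop, goAltLoop]
    exact (decide_eq_true hcovn).symm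
  | succ fuel ih =>
    intro i run covered c hn hi inv
    obtain ⟨hlen, hrun1, hruni, heq, hmax, hcovn, hcov2, h3a, h3b, h3c⟩ := inv
    have hin : i < a.length := by omega
    simp only [goLoop, goAltLoop]
    by_cases hd0 : a.getD (i-1) 0 = a.getD i 0
    · rw [if_neg (not_ne_iff.mpr hd0), if_pos (by omega : a.getD i 0 - a.getD (i-1) 0 = 0)]
      apply ih (i+1) (run+1) covered c (by omega) (by omega)
      refine ⟨hlen, by omega, by push_cast; omega, ?_, ?_, hcovn, ?_, h3a, h3b, h3c⟩
      · intro m hm1 hm2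
        simp only [Nat.add_sub_cancel]
        rcases Nat.lt_or_ge m i with h | h
        · have := heq m (by push_cast at hm1 ⊢; omega) h
          rw [this, hd0]
        · have he : m = i := by omega
          rw [he]
      · rcases hmax with hm | hm
        · left; push_cast; omega
        · right
          have e1 : (i+1) - (run+1).toNat - 1 = i - run.toNat - 1 := by omega
          have e2 : (i+1) - (run+1).toNat = i - run.toNat := by omega
          rw [e1, e2]
          exact hm
      · intro m hm1 hm2
        simp only [Nat.add_sub_cancel]
        have := hcov2 m (by omega) hm2
        rw [this, hd0]
    · rw [if_pos hd0]
      have hd0' : ¬ a.getD i 0 - a.getD (i-1) 0 = 0 := by omega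
      rw [if_neg hd0']
      have hcovi : covered ≤ (i : Int) := by
        by_contra hlt
        exact hd0 (hcov2 i (by omega) (by omega)).symm
      rw [if_neg (not_lt.mpr hcovi)]
      by_cases habs : (a.getD i 0 - a.getD (i-1) 0).natAbs = 1
      · rw [if_neg (not_not.mpr habs)]
        have hcases : a.getD i 0 - a.getD (i-1) 0 = 1 ∨ a.getD i 0 - a.getD (i-1) 0 = -1 := by
          omega
        rcases hcases with hd1 | hdm
        · -- uphill step
          have hlt : a.getD (i-1) 0 < a.getD i 0 := by omega
          rw [if_pos hlt, if_pos hd1]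
          by_cases hfail : run < l ∨ (i : Int) - l < covered
          · rw [if_pos hfail]
            have hnone : goUp a i 1 c l.toNat = none := by
              apply goUp_none
              rcases hfail with hf | hf
              · by_cases hri : run = (i : Int)
                · exact ⟨run.toNat, by omega, Or.inl (by omega)⟩
                · refine ⟨run.toNat, by omega, Or.inr ⟨by omega, Or.inl ?_⟩⟩
                  have e : ((i : Int) - (1 + (run.toNat : Int))).toNat = i - run.toNat - 1 := by
                    omega
                  rw [e]
                  rcases hmax with hm | hm
                  · exact absurd hm hri
                  · have heq2 := heq (i - run.toNat) (by omega) (by omega)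
                    intro hcon
                    exact hm (hcon.trans heq2.symm)
              · by_cases hl1 : 1 ≤ l
                · by_cases hcv1 : 1 ≤ covered
                  · obtain ⟨hlc, hblk⟩ := h3b hl1 hcv1
                    refine ⟨((i : Int) - covered).toNat, by omega,
                      Or.inr ⟨by omega, Or.inr ?_⟩⟩
                    have e : ((i : Int) - (1 + (((i : Int) - covered).toNat : Int))).toNat
                        = (covered - 1).toNat := by omega
                    rw [e]
                    exact hblk (covered - 1).toNat (by omega) (by omega)
                  · exact ⟨i, by omega, Or.inl (by push_cast; omega)⟩
                · exact absurd hf (by omega)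
            rw [hnone]
          · rw [if_neg hfail]
            push_neg at hfail
            obtain ⟨hlr, hcl⟩ := hfail
            have hh : ∀ t : Nat, t < l.toNat → 0 ≤ (i : Int) - (1 + t) ∧
                a.getD ((i : Int) - (1 + t)).toNat 0 = a.getD (i-1) 0 ∧
                c.getD ((i : Int) - (1 + t)).toNat false = false := by
              intro t ht
              refine ⟨by omega, ?_, ?_⟩
              · have e : ((i : Int) - (1 + t)).toNat = i - 1 - t := by omega
                rw [e]
                exact heq (i - 1 - t) (by omega) (by omega)
              · apply h3a
                omega
            obtain ⟨c', hup, hclen, hpt⟩ := goUp_some a i l.toNat 1 c le_rfl (by omega) hh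
            rw [hup]
            show goLoop a l (i+1) c' fuel = goAltLoop a l (i+1) 1 (i : Int) fuel
            apply ih (i+1) 1 (i : Int) c' (by omega) (by omega)
            refine ⟨by rw [hclen, hlen], le_rfl, by push_cast; omega, ?_, ?_,
              by push_cast; omega, ?_, ?_, ?_, ?_⟩
            · intro m hm1 hm2
              have he : m = i := by push_cast at hm1; omega
              rw [he]
              simp only [Nat.add_sub_cancel]
            · right
              simp only [Int.toNat_one, Nat.add_sub_cancel]
              exact hd0
            · intro m hm1 hm2
              exfalso
              simp only [Nat.add_sub_cancel] at hm1
              omega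
            · intro m hm
              rw [hpt m, h3a m (by omega)]
              simp only [Bool.false_or, decide_eq_false_iff_not]
              omega
            · intro hl1 _
              refine ⟨by omega, ?_⟩
              intro m hm1 hm2
              rw [hpt m, decide_eq_true (show (i : Int) - 1 - l.toNat < (m : Int) ∧
                (m : Int) ≤ (i : Int) - 1 by omega), Bool.or_true]
            · intro hl0 m
              rw [hpt m, h3c hl0 m]
              simp only [Bool.false_or, decide_eq_false_iff_not]
              omega
        · -- downhill step
          have hnlt : ¬ a.getD (i-1) 0 < a.getD i 0 := by omega
          rw [if_neg hnlt, if_neg (by omega : ¬ a.getD i 0 - a.getD (i-1) 0 = 1), if_pos hdm]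
          by_cases hgood : ∀ t : Nat, t < l.toNat →
              i + t < a.length ∧ a.getD (i+t) 0 = a.getD i 0
          · have hh : ∀ t : Nat, t < l.toNat → i + 0 + t < a.length ∧
                a.getD (i + 0 + t) 0 = a.getD i 0 ∧ c.getD (i + 0 + t) false = false := by
              intro t ht
              obtain ⟨h1, h2⟩ := hgood t ht
              have e : i + 0 + t = i + t := by omega
              rw [e]
              exact ⟨h1, h2, h3a (i+t) (by omega)⟩
            obtain ⟨c', hdn, hclen, hpt⟩ := goDown_some a i l.toNat 0 c hlen hh
            rw [hdn]
            show goLoop a l (i+1) c' fuel = goAltLoop a l (i+1) 1 ((i : Int) + l) fuel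
            apply ih (i+1) 1 ((i : Int) + l) c' (by omega) (by omega)
            have hcovn' : (i : Int) + l ≤ (a.length : Int) := by
              by_cases hl1 : 1 ≤ l
              · have := (hgood (l.toNat - 1) (by omega)).1
                push_cast at this ⊢
                omega
              · push_cast; omega
            refine ⟨by rw [hclen, hlen], le_rfl, by push_cast; omega, ?_, ?_, hcovn',
              ?_, ?_, ?_, ?_⟩
            · intro m hm1 hm2
              have he : m = i := by push_cast at hm1; omega
              rw [he]
              simp only [Nat.add_sub_cancel]
            · right
              simp only [Int.toNat_one, Nat.add_sub_cancel]
              exact hd0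
            · intro m hm1 hm2
              simp only [Nat.add_sub_cancel] at hm1 ⊢
              have ht : m - i < l.toNat := by omega
              have h2 := (hgood (m - i) ht).2
              have e : i + (m - i) = m := by omega
              rw [e] at h2
              exact h2
            · intro m hm
              rw [hpt m]
              by_cases hl1 : 1 ≤ l
              · rw [h3a m (by omega)]
                simp only [Bool.false_or, decide_eq_false_iff_not]
                omega
              · rw [h3c (by omega) m]
                simp only [Bool.false_or, decide_eq_false_iff_not]
                omega
            · intro hl1 _
              refine ⟨by omega, ?_⟩
              intro m hm1 hm2
              rw [hpt m, decide_eq_true (show i + 0 ≤ m ∧ m < i + 0 + l.toNat by omega),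
                Bool.or_true]
            · intro hl0 m
              rw [hpt m, h3c hl0 m]
              simp only [Bool.false_or, decide_eq_false_iff_not]
              omega
          · push_neg at hgood
            obtain ⟨t, ht, hbadt⟩ := hgood
            have hl1 : 1 ≤ l := by omega
            have hnone : goDown a i 0 c l.toNat = none := by
              apply goDown_none
              by_cases hlt2 : i + t < a.length
              · refine ⟨t, ht, Or.inr ⟨by omega, Or.inl ?_⟩⟩
                have e : i + 0 + t = i + t := by omega
                rw [e]
                exact hbadt hlt2
              · exact ⟨t, ht, Or.inl (by omega)⟩
            rw [hnone]
            show false = goAltLoop a l (i+1) 1 ((i : Int) + l) fuel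
            symm
            apply alt_doomed a l fuel (i+1) 1 ((i : Int) + l) (by omega)
            have hP : ∃ s : Nat, ¬ (i + s < a.length ∧ a.getD (i+s) 0 = a.getD i 0) :=
              ⟨t, fun hc => (hbadt hc.1) hc.2⟩
            have hPt0 := Nat.find_spec hP
            have ht0le : Nat.find hP ≤ t := Nat.find_min' hP (fun hc => (hbadt hc.1) hc.2)
            have ht0pos : 1 ≤ Nat.find hP := by
              rcases Nat.eq_zero_or_pos (Nat.find hP) with h0 | h
              · exfalso
                rw [h0] at hPt0
                exact hPt0 ⟨by omega, by rw [Nat.add_zero]⟩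
              · exact h
            have hprev : a.getD (i + (Nat.find hP - 1)) 0 = a.getD i 0 :=
              (not_not.mp (Nat.find_min hP (show Nat.find hP - 1 < Nat.find hP by omega))).2
            by_cases hnle : i + Nat.find hP < a.length
            · have hne2 : a.getD (i + Nat.find hP) 0 ≠ a.getD i 0 :=
                fun he => hPt0 ⟨hnle, he⟩
              refine Or.inr ⟨i + Nat.find hP, by omega, hnle, by push_cast; omega, ?_⟩
              have e : i + Nat.find hP - 1 = i + (Nat.find hP - 1) := by omega
              rw [e, hprev]
              exact hne2
            · left
              push_cast
              omega
      · rw [if_pos habs, if_neg (by omega : ¬ a.getD i 0 - a.getD (i-1) 0 = 1),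
          if_neg (by omega : ¬ a.getD i 0 - a.getD (i-1) 0 = -1)]

-- ===== VERDICT (by name: the statement is the Claim_ definition above) =====
theorem go_spec : Claim_equal_go := by
  intro a l _
  unfold Spec_go go go_alt
  rcases Nat.eq_zero_or_pos a.length with h0 | h1
  · simp [h0, goLoop, goAltLoop]
  · apply main_loop a l (a.length - 1) 1 1 0 (List.replicate a.length false) (by omega) le_rfl
    refine ⟨by simp, le_rfl, by norm_num, ?_, Or.inl (by norm_num), by push_cast; omega,
      ?_, ?_, ?_, ?_⟩
    · intro m _ hm
      have he : m = 0 := by omega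
      rw [he]
    · intro m _ hm
      exfalso
      omega
    · intro m _
      simp [List.getD]
    · intro _ h
      exact absurd h (by omega)
    · intro _ m
      simp [List.getD]
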